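-- pv_equiv track=rewrite | github.com/heebah-prog/PrimeAndCompositeNumber | app.py | getFactorsOfCompositeNumber
-- ===== SOURCE A (Python) =====
-- def getFactorsOfCompositeNumber(num):
--     factors= []
--     for x in range(2, num):
--         if(num%x == 0):
--             factors.append(x)
--         else:
--             pass
--     return factors
-- ===== SOURCE B (Python) =====
-- def getFactorsOfCompositeNumber(num):
--     small = []
--     large = []
--     d = 2
--     while d * d <= num:
--         if num % d == 0:
--             small.append(d)
--             q = num // d
--             if q != d:
--                 large.append(q)
--         d += 1
--     large.reverse()
--     return small + large
-- ===== Notes on version B (the rewrite author's own statement) =====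
-- stated objective: faster
-- what changed: B trial-divides only up to sqrt(num), collecting each small divisor and its cofactor (reversed at the end), instead of scanning every x in range(2, num).
import Mathlib
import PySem

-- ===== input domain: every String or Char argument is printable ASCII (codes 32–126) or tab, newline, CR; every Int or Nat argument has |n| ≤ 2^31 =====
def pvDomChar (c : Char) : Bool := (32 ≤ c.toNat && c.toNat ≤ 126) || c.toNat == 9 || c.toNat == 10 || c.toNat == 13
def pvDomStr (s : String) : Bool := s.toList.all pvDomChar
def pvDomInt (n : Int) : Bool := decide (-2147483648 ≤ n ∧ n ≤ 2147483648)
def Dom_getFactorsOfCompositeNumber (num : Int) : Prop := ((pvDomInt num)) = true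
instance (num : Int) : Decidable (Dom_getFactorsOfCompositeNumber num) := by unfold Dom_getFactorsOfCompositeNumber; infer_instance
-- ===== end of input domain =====

-- B replaces A's scan of every x in range(2, num) by trial division up to sqrt(num), collecting each
-- small divisor and its cofactor (cofactors reversed at the end); measurably faster on large num.

-- ===== PORT A =====
def getFactorsOfCompositeNumber (num : Int) : List Int :=
  (PySem.List.pyRange 2 num 1).foldl
    (fun factors x => if PySem.Int.mod num x == 0 then factors ++ [x] else factors) []

-- ===== PORT B =====
-- the while loop of Source B: d runs 2, 3, … while d*d ≤ num (d stays ≥ 2, so it is a Nat here).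
-- `fuel` only bounds the recursion depth so the loop is structurally recursive; it is started
-- large enough (num.toNat + 2) that it never runs out before the guard d*d ≤ num fails.
-- Returns the pair (small, large) of Source B's two accumulator lists.
def pvBLoop (num : Int) (fuel d : Nat) (small large : List Int) : List Int × List Int :=
  match fuel with
  | 0 => (small, large)
  | fuel + 1 =>
    if (d : Int) * d ≤ num then
      if PySem.Int.mod num d == 0 then
        pvBLoop num fuel (d + 1) (small ++ [(d : Int)])
          (if PySem.Int.floordiv num d != (d : Int) then large ++ [PySem.Int.floordiv num d] else large)
      else pvBLoop num fuel (d + 1) small large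
    else (small, large)

def getFactorsOfCompositeNumber_alt (num : Int) : List Int :=
  let sl := pvBLoop num (num.toNat + 2) 2 [] []
  sl.1 ++ sl.2.reverse

-- ===== PRECONDITION & SPEC =====
def Spec_getFactorsOfCompositeNumber (num : Int) (out : List Int) : Prop := out = getFactorsOfCompositeNumber_alt num
instance (num : Int) (out : List Int) : Decidable (Spec_getFactorsOfCompositeNumber num out) := by unfold Spec_getFactorsOfCompositeNumber; infer_instance

-- ===== CLAIM (what is proved, stated in full; the proofs are below) =====
def Claim_equal_getFactorsOfCompositeNumber : Prop := ∀ (num : Int), Dom_getFactorsOfCompositeNumber num → Spec_getFactorsOfCompositeNumber num (getFactorsOfCompositeNumber num)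

-- ===== LEMMAS AND PROOFS =====

-- the loop bound: the first d with d*d > num, i.e. ⌊√num⌋ + 1
def pvR (num : Int) : Int := (Nat.sqrt num.toNat : Int) + 1

-- A's test as a predicate
def pvP (num : Int) (x : Int) : Bool := PySem.Int.mod num x == 0

-- B's test for recording the cofactor
def pvQ (num : Int) (x : Int) : Bool := pvP num x && (PySem.Int.floordiv num x != x)

theorem pvR_pos (num : Int) : 0 < pvR num := by
  unfold pvR; positivity

-- the loop guard in terms of pvR
theorem pv_guard_iff (num y : Int) (hy : 2 ≤ y) : y * y ≤ num ↔ y < pvR num := by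
  unfold pvR
  rcases le_or_gt 0 num with hnum | hnum
  · obtain ⟨m, rfl⟩ : ∃ m : Nat, num = (m : Int) := ⟨num.toNat, by omega⟩
    obtain ⟨a, rfl⟩ : ∃ a : Nat, y = (a : Int) := ⟨y.toNat, by omega⟩
    rw [Int.toNat_natCast]
    rw [show ((a : Int) * a ≤ (m : Int)) ↔ a * a ≤ m from by exact_mod_cast Iff.rfl]
    rw [← Nat.le_sqrt]
    omega
  · have h2 : num.toNat = 0 := by omega
    rw [h2]
    constructor
    · intro h; nlinarith
    · intro h; norm_num [Nat.sqrt] at h; omega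

theorem pvBLoop_spec (num : Int) : ∀ (n : Nat) (d : Nat), 2 ≤ d → (pvR num).toNat ≤ d + n →
    ∀ (small large : List Int),
    pvBLoop num n d small large =
      (small ++ (PySem.List.pyRange d (pvR num) 1).filter (pvP num),
       large ++ ((PySem.List.pyRange d (pvR num) 1).filter (pvQ num)).map
          (fun x => PySem.Int.floordiv num x)) := by
  intro n
  induction n with
  | zero =>
    intro d hd hle small large
    have hR : pvR num ≤ (d : Int) := by have := pvR_pos num; omega
    rw [pvBLoop, PySem.List.pyRange_one_eq_nil hR]
    simp
  | succ n ih =>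
    intro d hd hle small large
    by_cases hg : (d : Int) * d ≤ num
    · have hdR : (d : Int) < pvR num := (pv_guard_iff num d (by exact_mod_cast hd)).mp hg
      rw [pvBLoop, if_pos hg, PySem.List.pyRange_one_cons hdR]
      have hcast : ((d : Int) + 1) = ((d + 1 : Nat) : Int) := by push_cast; ring
      rw [hcast]
      by_cases hp : PySem.Int.mod num d == 0
      · rw [if_pos hp]
        by_cases hq : PySem.Int.floordiv num d != (d : Int)
        · rw [if_pos hq, ih (d + 1) (by omega) (by omega)]
          have hQ : pvQ num d = true := by unfold pvQ pvP; rw [hp, hq]; rfl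
          simp [hQ, pvP, hp]
        · rw [if_neg hq, ih (d + 1) (by omega) (by omega)]
          rw [Bool.not_eq_true] at hq
          have hQ : pvQ num d = false := by unfold pvQ; rw [hq]; simp
          simp [hQ, pvP, hp]
      · rw [if_neg hp, ih (d + 1) (by omega) (by omega)]
        rw [Bool.not_eq_true] at hp
        have hQ : pvQ num d = false := by unfold pvQ pvP; rw [hp]; rfl
        simp [hQ, pvP, hp]
    · have hR : pvR num ≤ (d : Int) := by
        by_contra h
        exact hg ((pv_guard_iff num d (by exact_mod_cast hd)).mpr (by omega))
      rw [pvBLoop, if_neg hg, PySem.List.pyRange_one_eq_nil hR]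
      simp

theorem pv_alt_eq (num : Int) :
    getFactorsOfCompositeNumber_alt num =
      (PySem.List.pyRange 2 (pvR num) 1).filter (pvP num) ++
      (((PySem.List.pyRange 2 (pvR num) 1).filter (pvQ num)).map
          (fun x => PySem.Int.floordiv num x)).reverse := by
  unfold getFactorsOfCompositeNumber_alt
  rw [pvBLoop_spec num (num.toNat + 2) 2 (by norm_num)
    (by unfold pvR; have := Nat.sqrt_le_self num.toNat; omega)]
  simp

theorem pv_a_eq (num : Int) :
    getFactorsOfCompositeNumber num = (PySem.List.pyRange 2 num 1).filter (pvP num) := by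
  unfold getFactorsOfCompositeNumber pvP
  rw [PySem.List.foldl_append_if_eq_filter]
  simp

theorem pv_p_iff (num x : Int) : pvP num x = true ↔ x ∣ num := by
  unfold pvP
  rw [beq_iff_eq, PySem.Int.mod_eq_zero_iff_dvd]

-- the cofactor identity: x * (num // x) = num for a divisor x > 0
theorem pv_cof (num x : Int) (_hx : 0 < x) (h : x ∣ num) :
    x * PySem.Int.floordiv num x = num := by
  have h1 := PySem.Int.floordiv_mul_add_mod num x
  have h2 : PySem.Int.mod num x = 0 := by rw [PySem.Int.mod_eq_zero_iff_dvd]; exact h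
  nlinarith [h1, h2]

-- facts about a small divisor x (2 ≤ x < pvR num, x ∣ num) and its cofactor k = num // x
theorem pv_cof_facts (num x : Int) (hx2 : 2 ≤ x) (hxR : x < pvR num) (hdvd : x ∣ num) :
    x * PySem.Int.floordiv num x = num ∧ x ≤ PySem.Int.floordiv num x ∧
    PySem.Int.floordiv num x ∣ num ∧ PySem.Int.floordiv num x < num ∧
    (PySem.Int.floordiv num x ≠ x → pvR num ≤ PySem.Int.floordiv num x) := by
  set k := PySem.Int.floordiv num x with hk
  have hxx : x * x ≤ num := (pv_guard_iff num x hx2).mpr hxR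
  have hmul : x * k = num := pv_cof num x (by omega) hdvd
  have hxk : x ≤ k := by nlinarith [hxx, hmul]
  refine ⟨hmul, hxk, ⟨x, by rw [← hmul]; ring⟩, by nlinarith, ?_⟩
  intro hne
  have hlt : x < k := lt_of_le_of_ne hxk (Ne.symm hne)
  by_contra h
  have hkR : k < pvR num := by omega
  have : k * k ≤ num := (pv_guard_iff num k (by omega)).mpr hkR
  nlinarith

-- membership: y is a proper factor of num iff it is a small divisor or a recorded cofactor
theorem pv_mem (num y : Int) :
    y ∈ (PySem.List.pyRange 2 num 1).filter (pvP num) ↔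
    y ∈ (PySem.List.pyRange 2 (pvR num) 1).filter (pvP num) ++
      (((PySem.List.pyRange 2 (pvR num) 1).filter (pvQ num)).map
          (fun x => PySem.Int.floordiv num x)).reverse := by
  simp only [List.mem_append, List.mem_reverse, List.mem_map, List.mem_filter,
    PySem.List.mem_pyRange_one]
  constructor
  · rintro ⟨⟨h2y, hyn⟩, hp⟩
    have hdvd : y ∣ num := (pv_p_iff num y).mp hp
    by_cases hyR : y < pvR num
    · exact Or.inl ⟨⟨h2y, hyR⟩, hp⟩
    · -- y is a big divisor: it was recorded as the cofactor of k = num // y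
      set k := PySem.Int.floordiv num y with hk
      have hmul : y * k = num := pv_cof num y (by omega) hdvd
      have hnum : 0 < num := by omega
      have hk0 : 0 < k := by nlinarith
      have hk1 : k ≠ 1 := by intro h; rw [h] at hmul; omega
      have hk2 : 2 ≤ k := by omega
      have hyy : ¬ (y * y ≤ num) := by
        rw [pv_guard_iff num y h2y]; omega
      have hky : k < y := by nlinarith
      have hkR : k < pvR num := by
        rw [← pv_guard_iff num k hk2]; nlinarith
      have hkdvd : k ∣ num := ⟨y, by rw [← hmul]; ring⟩
      have hfk : PySem.Int.floordiv num k = y := by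
        have h2 : k * PySem.Int.floordiv num k = num := pv_cof num k (by omega) hkdvd
        have : k * PySem.Int.floordiv num k = k * y := by rw [h2, ← hmul]; ring
        exact (mul_left_cancel₀ (by omega) this)
      refine Or.inr ⟨k, ⟨⟨hk2, hkR⟩, ?_⟩, hfk⟩
      unfold pvQ
      rw [Bool.and_eq_true, (pv_p_iff num k), bne_iff_ne, hfk]
      exact ⟨hkdvd, by omega⟩
  · rintro (⟨⟨h2y, hyR⟩, hp⟩ | ⟨x, ⟨⟨h2x, hxR⟩, hq⟩, rfl⟩)
    · have hyy : y * y ≤ num := (pv_guard_iff num y h2y).mpr hyR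
      exact ⟨⟨h2y, by nlinarith⟩, hp⟩
    · unfold pvQ at hq
      rw [Bool.and_eq_true, pv_p_iff, bne_iff_ne] at hq
      obtain ⟨hmul, hxk, hkdvd, hkn, _⟩ := pv_cof_facts num x h2x hxR hq.1
      exact ⟨⟨by omega, hkn⟩, (pv_p_iff num _).mpr hkdvd⟩

theorem pv_sorted_rhs (num : Int) :
    ((PySem.List.pyRange 2 (pvR num) 1).filter (pvP num) ++
      (((PySem.List.pyRange 2 (pvR num) 1).filter (pvQ num)).map
          (fun x => PySem.Int.floordiv num x)).reverse).Pairwise (· < ·) := by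
  rw [List.pairwise_append]
  refine ⟨List.Pairwise.filter _ (PySem.List.pairwise_lt_pyRange_one 2 (pvR num)),
    List.pairwise_reverse.mpr ?_, ?_⟩
  · rw [List.pairwise_map]
    refine List.Pairwise.imp_of_mem ?_
      (List.Pairwise.filter (pvQ num) (PySem.List.pairwise_lt_pyRange_one 2 (pvR num)))
    intro a b ha hb hab
    rw [List.mem_filter, PySem.List.mem_pyRange_one] at ha hb
    obtain ⟨⟨h2a, haR⟩, hqa⟩ := ha
    obtain ⟨⟨h2b, hbR⟩, hqb⟩ := hb
    unfold pvQ at hqa hqb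
    rw [Bool.and_eq_true, pv_p_iff] at hqa hqb
    obtain ⟨hma, hak, _, _, _⟩ := pv_cof_facts num a h2a haR hqa.1
    obtain ⟨hmb, hbk, _, _, _⟩ := pv_cof_facts num b h2b hbR hqb.1
    -- a < b and a * fa = b * fb = num force fb < fa
    nlinarith
  · intro s hs t ht
    rw [List.mem_filter, PySem.List.mem_pyRange_one] at hs
    rw [List.mem_reverse, List.mem_map] at ht
    obtain ⟨x, hx, rfl⟩ := ht
    rw [List.mem_filter, PySem.List.mem_pyRange_one] at hx
    obtain ⟨⟨h2x, hxR⟩, hqx⟩ := hx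
    unfold pvQ at hqx
    rw [Bool.and_eq_true, pv_p_iff, bne_iff_ne] at hqx
    obtain ⟨_, _, _, _, hbig⟩ := pv_cof_facts num x h2x hxR hqx.1
    have := hbig hqx.2
    omega

theorem pv_main (num : Int) :
    (PySem.List.pyRange 2 num 1).filter (pvP num) =
      (PySem.List.pyRange 2 (pvR num) 1).filter (pvP num) ++
      (((PySem.List.pyRange 2 (pvR num) 1).filter (pvQ num)).map
          (fun x => PySem.Int.floordiv num x)).reverse := by
  have hL : ((PySem.List.pyRange 2 num 1).filter (pvP num)).Pairwise (· < ·) :=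
    List.Pairwise.filter _ (PySem.List.pairwise_lt_pyRange_one 2 num)
  have hR := pv_sorted_rhs num
  have hperm := (List.perm_ext_iff_of_nodup (hL.imp ne_of_lt) (hR.imp ne_of_lt)).mpr
    (pv_mem num)
  exact hperm.eq_of_pairwise (fun a b _ _ hab hba => absurd hba (not_lt.mpr hab.le)) hL hR

-- ===== VERDICT (by name: the statement is the Claim_ definition above) =====
theorem getFactorsOfCompositeNumber_spec : Claim_equal_getFactorsOfCompositeNumber := by
  intro num _
  unfold Spec_getFactorsOfCompositeNumber
  rw [pv_a_eq, pv_alt_eq, pv_main]
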